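-- pv_equiv track=rewrite | github.com/jojostx/alx-frontend-for-fun | markdown2html.py | parse_case_insensitive_C
-- ===== SOURCE A (Python) =====
-- def parse_case_insensitive_C(lines):
--     """
--     Parses a line into MD5 (lowercase) the content.
--     """
--     html_lines = []
--     for line in lines:
--         line_list = line.replace('((', ',||,').replace('))', ',||,').split(',')
--
--         i = 0
--         j = i
--         while i < len(line_list):
--             line_part = line_list[i]
--             if line_part == '||':
--
--                 j = i + 1
--                 while j < len(line_list):
--                     if line_list[j] == '||':
--                         line_list[i] = ''
--                         line_list[j] = ''
--
--                         if line_list[i+1] != '':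
--                             line_list[i+1] = replace_all_C(line_list[i+1])
--
--                         i = j
--                         break
--                     else:
--                         j += 1
--                 i = j
--             else:
--                 i += 1
--
--         html_lines.append(''.join(line_list))
--
--     return html_lines
--
-- def replace_all_C(line):
--     """
--     Replaces all c characters in a string.
--     """
--     return line.replace('c', '').replace('C', '')
-- ===== SOURCE B (Python) =====
-- def replace_all_C(line):
--     """Replaces all c/C characters in a string."""
--     return line.replace('c', '').replace('C', '')
--
--
-- def _pair_up(marks):
--     """Consecutive disjoint pairs of a list of indices; an odd trailing one is dropped."""
--     pairs = []
--     k = 0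
--     while k + 1 < len(marks):
--         pairs.append((marks[k], marks[k + 1]))
--         k += 2
--     return pairs
--
--
-- def parse_case_insensitive_C(lines):
--     """Strip c/C inside (( )) delimited spans, per line (two-pass index version)."""
--     html_lines = []
--     for line in lines:
--         toks = line.replace('((', ',||,').replace('))', ',||,').split(',')
--         marks = [i for i in range(len(toks)) if toks[i] == '||']
--         for o, c in _pair_up(marks):
--             toks[o] = ''
--             toks[c] = ''
--             if toks[o + 1] != '':
--                 toks[o + 1] = replace_all_C(toks[o + 1])
--         html_lines.append(''.join(toks))
--     return html_lines
-- ===== Notes on version B (the rewrite author's own statement) =====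
-- stated objective: alternative
-- what changed: A's nested in-place while loops that rescan the mutated token list for '||' markers are replaced by a two-pass decomposition: collect all marker indices once, then apply the edits over those indices in consecutive disjoint pairs.
import Mathlib
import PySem

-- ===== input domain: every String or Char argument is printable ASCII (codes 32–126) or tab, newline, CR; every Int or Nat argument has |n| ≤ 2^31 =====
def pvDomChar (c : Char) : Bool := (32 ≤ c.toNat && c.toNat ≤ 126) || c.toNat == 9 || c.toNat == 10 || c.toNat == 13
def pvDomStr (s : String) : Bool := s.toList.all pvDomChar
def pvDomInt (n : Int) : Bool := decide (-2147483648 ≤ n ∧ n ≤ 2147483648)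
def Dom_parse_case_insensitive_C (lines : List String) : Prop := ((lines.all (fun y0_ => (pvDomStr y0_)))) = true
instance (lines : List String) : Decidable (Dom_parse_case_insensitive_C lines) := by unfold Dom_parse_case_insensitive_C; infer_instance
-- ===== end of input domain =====

-- B replaces A's nested index-scanning while loops (with in-place rescanning) by a two-pass
-- decomposition: collect all '||' marker indices once, then process them in consecutive pairs.
-- Both ports share the identical per-line preprocessing and the identical replace_all_C helper,
-- exactly as both Python sources do.

-- ===== PORT A =====
-- replace_all_C (shared by both Python sources verbatim)
def pvReplaceAllC (line : String) : String :=
  PySem.Str.replace (PySem.Str.replace line "c" "") "C" ""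

-- line.replace('((', ',||,').replace('))', ',||,').split(',')   (identical line in A and B)
def pvTokens (line : String) : List String :=
  -- .split(',') : sep is the non-empty literal "," so Str.split? is always `some`
  (PySem.Str.split? (PySem.Str.replace (PySem.Str.replace line "((" ",||,") "))" ",||,") ",").getD []

-- A's inner `while j < len(line_list)` search-and-mutate loop; returns (list, final j)
def pvInnerA (ll : List String) (i j : Nat) : List String × Nat :=
  if _h : j < ll.length then
    if ll.getD j "" == "||" then
      let ll1 := ll.set i ""
      let ll2 := ll1.set j ""
      let ll3 := if ll2.getD (i+1) "" ≠ "" then ll2.set (i+1) (pvReplaceAllC (ll2.getD (i+1) "")) else ll2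
      (ll3, j)
    else pvInnerA ll i (j+1)
  else (ll, j)
termination_by ll.length - j

theorem pvInnerA_length (ll : List String) (i j : Nat) : (pvInnerA ll i j).1.length = ll.length := by
  fun_induction pvInnerA ll i j with
  | case1 j h hm ll1 ll2 ll3 =>
      simp only [ll3, ll2, ll1]
      split <;> simp
  | case2 j h hm ih => exact ih
  | case3 j h => rfl

theorem pvInnerA_snd_ge (ll : List String) (i j : Nat) : j ≤ (pvInnerA ll i j).2 := by
  fun_induction pvInnerA ll i j with
  | case1 j h hm ll1 ll2 ll3 => simp
  | case2 j h hm ih => omega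
  | case3 j h => simp

-- A's outer `while i < len(line_list)` loop
def pvOuterA (ll : List String) (i : Nat) : List String :=
  if _h : i < ll.length then
    if ll.getD i "" == "||" then
      let r := pvInnerA ll i (i+1)
      pvOuterA r.1 r.2
    else pvOuterA ll (i+1)
  else ll
termination_by ll.length - i
decreasing_by
  · have h1 := pvInnerA_length ll i (i+1)
    have h2 := pvInnerA_snd_ge ll i (i+1)
    omega
  · omega

def parse_case_insensitive_C (lines : List String) : List String :=
  lines.foldl (fun html_lines line => html_lines ++ [PySem.Str.join "" (pvOuterA (pvTokens line) 0)]) []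

-- ===== PORT B =====
-- marks = [i for i in range(len(toks)) if toks[i] == '||']
def pvMarks (toks : List String) : List Nat :=
  (List.range toks.length).filter (fun i => toks.getD i "" == "||")

-- _pair_up
def pvPairUp : List Nat → List (Nat × Nat)
  | o :: c :: rest => (o, c) :: pvPairUp rest
  | _ => []

-- body of B's `for o, c in _pair_up(marks)` loop
def pvApplyPair (toks : List String) (p : Nat × Nat) : List String :=
  let t1 := toks.set p.1 ""
  let t2 := t1.set p.2 ""
  if t2.getD (p.1+1) "" ≠ "" then t2.set (p.1+1) (pvReplaceAllC (t2.getD (p.1+1) "")) else t2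

def parse_case_insensitive_C_alt (lines : List String) : List String :=
  lines.map (fun line =>
    let toks := pvTokens line
    PySem.Str.join "" ((pvPairUp (pvMarks toks)).foldl pvApplyPair toks))

-- ===== PRECONDITION & SPEC =====
def Spec_parse_case_insensitive_C (lines : List String) (out : List String) : Prop := out = parse_case_insensitive_C_alt lines
instance (lines : List String) (out : List String) : Decidable (Spec_parse_case_insensitive_C lines out) := by unfold Spec_parse_case_insensitive_C; infer_instance

-- ===== CLAIM (what is proved, stated in full; the proofs are below) =====
def Claim_equal_parse_case_insensitive_C : Prop := ∀ (lines : List String), Dom_parse_case_insensitive_C lines → Spec_parse_case_insensitive_C lines (parse_case_insensitive_C lines)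

-- ===== LEMMAS AND PROOFS =====

-- the '||' marker positions of ll that are ≥ i, in increasing order
def pvMarksFrom (ll : List String) (i : Nat) : List Nat :=
  if i < ll.length then
    (if ll.getD i "" == "||" then [i] else []) ++ pvMarksFrom ll (i+1)
  else []
termination_by ll.length - i

theorem pvMarksFrom_eq_filter_range' (ll : List String) (i : Nat) :
    pvMarksFrom ll i = (List.range' i (ll.length - i)).filter (fun k => ll.getD k "" == "||") := by
  fun_induction pvMarksFrom ll i with
  | case1 i h ih =>
      have hn : ll.length - i = (ll.length - (i+1)) + 1 := by omega
      rw [ih, hn, List.range'_succ, List.filter_cons]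
      split <;> simp_all
  | case2 i h =>
      have hn : ll.length - i = 0 := by omega
      simp [hn]

theorem pvMarks_eq (toks : List String) : pvMarks toks = pvMarksFrom toks 0 := by
  rw [pvMarksFrom_eq_filter_range', pvMarks, List.range_eq_range']
  simp

theorem pvMarksFrom_agree (ll₁ ll₂ : List String) (j : Nat)
    (hlen : ll₁.length = ll₂.length)
    (hag : ∀ k, j ≤ k → ll₁.getD k "" = ll₂.getD k "") :
    pvMarksFrom ll₁ j = pvMarksFrom ll₂ j := by
  rw [pvMarksFrom_eq_filter_range', pvMarksFrom_eq_filter_range', hlen]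
  apply List.filter_congr
  intro k hk
  have := List.mem_range'.1 hk
  rw [hag k (by omega)]

theorem pvMarksFrom_cons (ll : List String) (j n : Nat) (rest : List Nat)
    (h : pvMarksFrom ll j = n :: rest) :
    j ≤ n ∧ n < ll.length ∧ ll.getD n "" = "||" ∧ rest = pvMarksFrom ll (n+1) := by
  fun_induction pvMarksFrom ll j with
  | case1 j hj ih =>
      by_cases hm : ll.getD j "" = "||"
      · rw [if_pos (by simpa using hm), List.singleton_append] at h
        rw [List.cons.injEq] at h
        obtain ⟨h1, h2⟩ := h
        subst h1
        exact ⟨le_refl _, hj, hm, h2.symm⟩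
      · rw [if_neg (by simpa using hm), List.nil_append] at h
        obtain ⟨h1, h2, h3, h4⟩ := ih h
        exact ⟨by omega, h2, h3, h4⟩
  | case2 j hj => exact absurd h (by simp)

theorem pvApplyPair_length (ll : List String) (p : Nat × Nat) :
    (pvApplyPair ll p).length = ll.length := by
  simp only [pvApplyPair]
  split <;> simp

theorem pvApplyPair_getD_ge (ll : List String) (i n k : Nat) (hk : n < k) (hin : i < n) :
    (pvApplyPair ll (i, n)).getD k "" = ll.getD k "" := by
  simp only [pvApplyPair]
  split <;>
    simp [List.getD_eq_getElem?_getD, List.getElem?_set_ne (by omega : i ≠ k),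
      List.getElem?_set_ne (by omega : n ≠ k), List.getElem?_set_ne (by omega : i+1 ≠ k)]

theorem pvApplyPair_getD_n (ll : List String) (i n : Nat) (_hin : i < n) (hn : n < ll.length) :
    (pvApplyPair ll (i, n)).getD n "" = "" := by
  simp only [pvApplyPair]
  by_cases he : i + 1 = n
  · -- the token between the markers is '' (just set), so the conditional branch is not taken
    rw [if_neg]
    · simp [List.getD_eq_getElem?_getD, hn]
    · simp [he, List.getD_eq_getElem?_getD, hn]
  · split
    · rw [List.getD_eq_getElem?_getD, List.getElem?_set_ne (by omega : i+1 ≠ n),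
        List.getElem?_set_self (by simpa using hn)]
      simp
    · rw [List.getD_eq_getElem?_getD, List.getElem?_set_self (by simpa using hn)]
      simp

theorem pvInnerA_spec (ll : List String) (i j : Nat) (hj : j ≤ ll.length) :
    pvInnerA ll i j = match pvMarksFrom ll j with
      | n :: _ => (pvApplyPair ll (i, n), n)
      | [] => (ll, ll.length) := by
  fun_induction pvInnerA ll i j with
  | case1 j h hm ll1 ll2 ll3 =>
      rw [pvMarksFrom, if_pos h, if_pos hm]
      simp only [ll3, ll2, ll1, pvApplyPair, List.singleton_append, dite_eq_ite]
  | case2 j h hm ih =>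
      rw [pvMarksFrom, if_pos h, if_neg hm, List.nil_append]
      exact ih (by omega)
  | case3 j h =>
      have hje : j = ll.length := by omega
      subst hje
      rw [pvMarksFrom, if_neg (by omega)]

theorem pvOuterA_eq_foldl (ll : List String) (i : Nat) :
    pvOuterA ll i = (pvPairUp (pvMarksFrom ll i)).foldl pvApplyPair ll := by
  fun_induction pvOuterA ll i with
  | case1 ll i h hm r ih =>
      rw [pvMarksFrom, if_pos h, if_pos hm, List.singleton_append]
      cases hrec : pvMarksFrom ll (i+1) with
      | nil =>
          have hspec : pvInnerA ll i (i+1) = (ll, ll.length) := by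
            rw [pvInnerA_spec ll i (i+1) (by omega), hrec]
          simp only [r, hspec] at ih ⊢
          rw [ih, pvMarksFrom, if_neg (by omega)]
          simp [pvPairUp]
      | cons n rest =>
          have hspec : pvInnerA ll i (i+1) = (pvApplyPair ll (i, n), n) := by
            rw [pvInnerA_spec ll i (i+1) (by omega), hrec]
          obtain ⟨hge, hlt, hmark, hrest⟩ := pvMarksFrom_cons ll (i+1) n rest hrec
          simp only [r, hspec] at ih ⊢
          simp only [pvPairUp, List.foldl_cons]
          rw [ih]
          congr 1
          -- pvMarksFrom (pvApplyPair ll (i,n)) n = rest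
          have hlen := pvApplyPair_length ll (i, n)
          have h1 : pvMarksFrom (pvApplyPair ll (i, n)) n = pvMarksFrom (pvApplyPair ll (i, n)) (n+1) := by
            rw [pvMarksFrom, if_pos (by omega),
              if_neg (by
                have hz := pvApplyPair_getD_n ll i n (by omega) hlt
                rw [List.getD_eq_getElem?_getD] at hz
                simp [hz])]
            simp
          have h2 : pvMarksFrom (pvApplyPair ll (i, n)) (n+1) = pvMarksFrom ll (n+1) := by
            apply pvMarksFrom_agree _ _ _ hlen
            intro k hk
            exact pvApplyPair_getD_ge ll i n k (by omega) (by omega)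
          rw [h1, h2, ← hrest]
  | case2 ll i h hm ih =>
      rw [pvMarksFrom, if_pos h, if_neg hm, List.nil_append]
      exact ih
  | case3 ll i h =>
      rw [pvMarksFrom, if_neg h]
      simp [pvPairUp]

theorem foldl_append_eq_map (lines : List String) (f : String → String) (acc : List String) :
    lines.foldl (fun a l => a ++ [f l]) acc = acc ++ lines.map f := by
  induction lines generalizing acc with
  | nil => simp
  | cons x xs ih => simp [ih]

-- ===== VERDICT (by name: the statement is the Claim_ definition above) =====
theorem parse_case_insensitive_C_spec : Claim_equal_parse_case_insensitive_C := by
  intro lines _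
  unfold Spec_parse_case_insensitive_C parse_case_insensitive_C parse_case_insensitive_C_alt
  rw [foldl_append_eq_map]
  simp only [List.nil_append]
  apply List.map_congr_left
  intro line _
  rw [pvOuterA_eq_foldl, pvMarks_eq]
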